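-- pv_equiv track=rewrite | github.com/9382/advent-of-code-2023 | 7/code.py | CreateValueFromCards
-- ===== SOURCE A (Python) =====
-- LabelToValue = {"A":14, "K":13, "Q":12, "J":11, "T":10}
--
-- def CreateValueFromCards(Card):
-- 	Num = ""
-- 	for char in Card:
-- 		if char in LabelToValue:
-- 			Num = Num + str(LabelToValue[char])
-- 		else:
-- 			Num = Num + "0" + char
-- 	return int(Num)
-- ===== SOURCE B (Python) =====
-- LabelToValue = {"A":14, "K":13, "Q":12, "J":11, "T":10}
--
-- def CreateValueFromCards(Card):
--     result = 0
--     for char in Card: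
--         if char in LabelToValue:
--             v = LabelToValue[char]
--         else:
--             v = int(char)
--         result = result * 100 + v
--     return result
-- ===== Notes on version B (the rewrite author's own statement) =====
-- stated objective: simpler
-- what changed: B replaces A's build-a-decimal-string-then-int() pipeline with a single integer accumulator (result = result*100 + per-card value), eliminating string concatenation and the final parse.
-- outside the precondition, e.g. on CreateValueFromCards('_5'): A returns 5, B raises ValueError; on CreateValueFromCards('5 '): A returns 50, B raises ValueError
-- crash fix: On the empty string A raises ValueError (int('')) while B returns 0, the natural value of an empty hand. — e.g. on CreateValueFromCards(""): A raises ValueError, B returns 0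
import Mathlib
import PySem

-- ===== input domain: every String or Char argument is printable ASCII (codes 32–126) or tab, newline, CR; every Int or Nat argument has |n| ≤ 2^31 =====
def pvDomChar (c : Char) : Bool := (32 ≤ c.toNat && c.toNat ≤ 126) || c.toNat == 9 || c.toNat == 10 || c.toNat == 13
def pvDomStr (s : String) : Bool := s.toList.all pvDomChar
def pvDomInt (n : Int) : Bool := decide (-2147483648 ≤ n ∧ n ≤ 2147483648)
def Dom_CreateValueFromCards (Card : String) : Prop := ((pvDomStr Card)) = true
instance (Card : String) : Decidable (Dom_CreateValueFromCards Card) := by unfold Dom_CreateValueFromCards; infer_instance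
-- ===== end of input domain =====

-- B replaces A's build-a-decimal-string-then-int() pipeline with a single integer
-- accumulator (result = result*100 + per-card value); equal on Pre_, and B returns 0
-- on the empty string where A raises ValueError.

-- shared module-level constant: LabelToValue = {"A":14, "K":13, "Q":12, "J":11, "T":10}
def pvLabelToValue : PySem.Dict Char Int :=
  PySem.Dict.mk [('A', 14), ('K', 13), ('Q', 12), ('J', 11), ('T', 10)]

-- ===== PORT A =====
def CreateValueFromCards (Card : String) : Int :=
  let Num : List Char := Card.toList.foldl (fun Num char =>
    match pvLabelToValue.get? char with           -- 'char in LabelToValue' + LabelToValue[char]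
    | some v => Num ++ PySem.Int.toChars v        -- Num = Num + str(LabelToValue[char])
    | none => Num ++ ['0', char])                 -- Num = Num + zero digit + char
    []
  (PySem.Int.ofChars? Num).getD 0                 -- int(Num); none = ValueError, excluded by Pre_

-- ===== PORT B =====
def CreateValueFromCards_alt (Card : String) : Int :=
  (Card.toList.foldl (fun acc char =>
      acc.bind (fun result =>
        match pvLabelToValue.get? char with       -- 'char in LabelToValue' + LabelToValue[char]
        | some v => some (result * 100 + v)
        | none => (PySem.Int.ofChars? [char]).bind (fun v => some (result * 100 + v))))
                                                  -- v = int(char); none = ValueError, excluded by Pre_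
    (some 0)).getD 0

-- ===== PRECONDITION & SPEC =====
-- Pre_ excludes the empty string (A raises ValueError on int('')) and strings containing a
-- character that is neither a digit nor a face label: on those A raises ValueError too,
-- except for accidental cases where int()'s leniency (an underscore between digits, a single
-- trailing whitespace) lets A return a value assembled from the leftover zero-prefixed pairs; B
-- raises ValueError on every such character.
def Pre_CreateValueFromCards (Card : String) : Prop :=
  Card.toList ≠ [] ∧
    Card.toList.all (fun c => (['A', 'K', 'Q', 'J', 'T'] : List Char).contains c || c.isDigit) = true
instance (Card : String) : Decidable (Pre_CreateValueFromCards Card) := by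
  unfold Pre_CreateValueFromCards; infer_instance
def pvWitness_CreateValueFromCards : String := "KT23"

-- On the empty string A raises ValueError (int('')) while B returns 0, the natural value of an empty hand.
def Raises_CreateValueFromCards (Card : String) : Prop := Card.toList = []
instance (Card : String) : Decidable (Raises_CreateValueFromCards Card) := by
  unfold Raises_CreateValueFromCards; infer_instance
def pvRaiseWitness_CreateValueFromCards : String := ""
def pvRaiseWitnessOut_CreateValueFromCards : Int := 0

def Spec_CreateValueFromCards (Card : String) (out : Int) : Prop := out = CreateValueFromCards_alt Card
instance (Card : String) (out : Int) : Decidable (Spec_CreateValueFromCards Card out) := by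
  unfold Spec_CreateValueFromCards; infer_instance

-- ===== CLAIM (what is proved, stated in full; the proofs are below) =====
def Claim_equal_CreateValueFromCards : Prop := ∀ (Card : String), Dom_CreateValueFromCards Card → Pre_CreateValueFromCards Card → Spec_CreateValueFromCards Card (CreateValueFromCards Card)
def Claim_raises_CreateValueFromCards : Prop := (∀ (Card : String), Dom_CreateValueFromCards Card → Raises_CreateValueFromCards Card → ¬ Pre_CreateValueFromCards Card) ∧ (Dom_CreateValueFromCards (pvRaiseWitness_CreateValueFromCards) ∧ Raises_CreateValueFromCards (pvRaiseWitness_CreateValueFromCards) ∧ CreateValueFromCards_alt (pvRaiseWitness_CreateValueFromCards) = pvRaiseWitnessOut_CreateValueFromCards)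

-- ===== LEMMAS AND PROOFS =====

-- the per-character value both programs effectively use
def pvVal (c : Char) : ℕ :=
  if c = 'A' then 14 else if c = 'K' then 13 else if c = 'Q' then 12
  else if c = 'J' then 11 else if c = 'T' then 10 else c.toNat - 48

-- the two characters A appends for one card
def pvBlock (c : Char) : List Char :=
  match pvLabelToValue.get? c with
  | some v => PySem.Int.toChars v
  | none => ['0', c]

-- `int(...)`'s digit loop, extracted from `PySem.Int.ofChars?` (whose digit-scanner is a
-- private definition) together with its unfolding equations, by unification.
theorem pvParserExtract : ∃ g : List Char → Bool → ℕ → Option ℕ,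
    (∀ s, PySem.Int.ofChars? s =
      (match (List.dropWhile PySem.Int.isIntSpace (List.dropWhile PySem.Int.isIntSpace s).reverse).reverse with
       | '-' :: ds => Option.map (fun n => -n) (do let a ← (match ds with | [] => none | cs => g cs false 0); pure ((a : ℕ) : Int))
       | '+' :: ds => Option.map (fun n => n) (do let a ← (match ds with | [] => none | cs => g cs false 0); pure ((a : ℕ) : Int))
       | ds => Option.map (fun n => n) (do let a ← (match ds with | [] => none | cs => g cs false 0); pure ((a : ℕ) : Int)))) ∧
    (∀ a acc, g [] a acc = if a = true then some acc else none) ∧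
    (∀ c rest a acc, g (c :: rest) a acc =
      if c.isDigit = true then g rest true (acc * 10 + (c.toNat - '0'.toNat))
      else if c = '_' ∧ a = true then
        (match rest with | d :: _ => if d.isDigit = true then g rest false acc else none | [] => none)
      else none) := by
  exact ⟨_, fun s => (by delta PySem.Int.ofChars?; rfl), fun a acc => rfl, fun c rest a acc => rfl⟩

-- int(ds) on a nonempty all-digit string is the base-10 fold
theorem pvOfCharsDigits (ds : List Char) (hne : ds ≠ [])
    (hd : ∀ c ∈ ds, c.isDigit = true) :
    PySem.Int.ofChars? ds =
      some ((ds.foldl (fun a c => a * 10 + (c.toNat - 48)) 0 : ℕ) : Int) := by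
  obtain ⟨g, hof, hnil, hcons⟩ := pvParserExtract
  have hspace : ∀ c ∈ ds, PySem.Int.isIntSpace c = false := by
    intro c hc
    have h := hd c hc
    simp only [PySem.Int.isIntSpace, Bool.or_eq_false_iff, decide_eq_false_iff_not]
    refine ⟨⟨⟨⟨⟨?_, ?_⟩, ?_⟩, ?_⟩, ?_⟩, ?_⟩ <;> (rintro rfl; exact absurd h (by decide))
  have hgo : ∀ (t : List Char) (acc : ℕ), (∀ c ∈ t, c.isDigit = true) →
      g t true acc = some (t.foldl (fun a c => a * 10 + (c.toNat - 48)) acc) := by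
    intro t
    induction t with
    | nil => intro acc _; rw [hnil]; simp
    | cons c t ih =>
      intro acc h
      rw [hcons, if_pos (h c (List.mem_cons_self))]
      simpa using ih _ (fun x hx => h x (List.mem_cons_of_mem _ hx))
  have hstrip : (List.dropWhile PySem.Int.isIntSpace
      (List.dropWhile PySem.Int.isIntSpace ds).reverse).reverse = ds := by
    rw [List.dropWhile_eq_self_iff.2, List.dropWhile_eq_self_iff.2, List.reverse_reverse]
    · intro hl; simp only [Bool.not_eq_true]
      exact hspace _ (List.getElem_mem hl)
    · intro hl; simp only [Bool.not_eq_true]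
      refine hspace _ ((List.dropWhile_sublist PySem.Int.isIntSpace).subset
        (List.mem_reverse.mp (List.getElem_mem hl)))
  rw [hof ds, hstrip]
  cases ds with
  | nil => exact absurd rfl hne
  | cons d t =>
    have hdig : d.isDigit = true := hd d (List.mem_cons_self)
    split
    · rename_i ds' heq
      exfalso
      rw [List.cons_eq_cons] at heq
      exact absurd hdig (by rw [heq.1]; decide)
    · rename_i ds' heq
      exfalso
      rw [List.cons_eq_cons] at heq
      exact absurd hdig (by rw [heq.1]; decide)
    · show Option.map _ ((g (d :: t) false 0).bind _) = _
      rw [hcons, if_pos hdig]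
      rw [hgo t _ (fun x hx => hd x (List.mem_cons_of_mem _ hx))]
      simp [List.foldl_cons]

-- A's loop builds the flatMap of the per-card blocks
theorem pvFoldA (l : List Char) (N : List Char) :
    l.foldl (fun Num char =>
      match pvLabelToValue.get? char with
      | some v => Num ++ PySem.Int.toChars v
      | none => Num ++ ['0', char]) N = N ++ l.flatMap pvBlock := by
  have hfun : (fun (Num : List Char) (char : Char) =>
      match pvLabelToValue.get? char with
      | some v => Num ++ PySem.Int.toChars v
      | none => Num ++ ['0', char]) = fun Num char => Num ++ pvBlock char := by
    funext Num char
    unfold pvBlock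
    cases pvLabelToValue.get? char <;> rfl
  rw [hfun, PySem.List.foldl_append_eq_flatMap]

theorem pvGet_digit_none (c : Char) (h : c.isDigit = true) :
    pvLabelToValue.get? c = none := by
  simp only [pvLabelToValue, PySem.Dict.get?_mk_cons, beq_iff_eq]
  split_ifs with h1 h2 h3 h4 h5
  · exact absurd h (by rw [← h1]; decide)
  · exact absurd h (by rw [← h2]; decide)
  · exact absurd h (by rw [← h3]; decide)
  · exact absurd h (by rw [← h4]; decide)
  · exact absurd h (by rw [← h5]; decide)
  · rfl

theorem pvVal_digit (c : Char) (h : c.isDigit = true) : pvVal c = c.toNat - 48 := by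
  unfold pvVal
  split_ifs with h1 h2 h3 h4 h5 <;>
    first
      | (exfalso; subst ‹c = _›; exact absurd h (by decide))
      | rfl

theorem pvBlock_pair (c d1 d2 : Char) (hb : pvBlock c = [d1, d2])
    (h1 : d1.isDigit = true) (h2 : d2.isDigit = true)
    (hv : ∀ a : ℕ, (a * 10 + (d1.toNat - 48)) * 10 + (d2.toNat - 48) = a * 100 + pvVal c) :
    (∀ d ∈ pvBlock c, d.isDigit = true) ∧ pvBlock c ≠ [] ∧
    (∀ a : ℕ, (pvBlock c).foldl (fun a c => a * 10 + (c.toNat - 48)) a = a * 100 + pvVal c) := by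
  rw [hb]
  refine ⟨?_, by simp, fun a => by simpa [List.foldl] using hv a⟩
  intro d hd
  simp only [List.mem_cons, List.not_mem_nil, or_false] at hd
  rcases hd with rfl | rfl
  · exact h1
  · exact h2

theorem pvBlock_digits (c : Char)
    (h : c ∈ (['A', 'K', 'Q', 'J', 'T'] : List Char) ∨ c.isDigit = true) :
    (∀ d ∈ pvBlock c, d.isDigit = true) ∧ pvBlock c ≠ [] ∧
    (∀ a : ℕ, (pvBlock c).foldl (fun a c => a * 10 + (c.toNat - 48)) a = a * 100 + pvVal c) := by
  rcases h with h | h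
  · fin_cases h
    · exact pvBlock_pair 'A' '1' '4' (by decide) (by decide) (by decide)
        (fun a => by rw [(by decide : pvVal 'A' = 14), (by decide : '1'.toNat = 49),
          (by decide : '4'.toNat = 52)]; omega)
    · exact pvBlock_pair 'K' '1' '3' (by decide) (by decide) (by decide)
        (fun a => by rw [(by decide : pvVal 'K' = 13), (by decide : '1'.toNat = 49),
          (by decide : '3'.toNat = 51)]; omega)
    · exact pvBlock_pair 'Q' '1' '2' (by decide) (by decide) (by decide)
        (fun a => by rw [(by decide : pvVal 'Q' = 12), (by decide : '1'.toNat = 49),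
          (by decide : '2'.toNat = 50)]; omega)
    · exact pvBlock_pair 'J' '1' '1' (by decide) (by decide) (by decide)
        (fun a => by rw [(by decide : pvVal 'J' = 11), (by decide : '1'.toNat = 49)]; omega)
    · exact pvBlock_pair 'T' '1' '0' (by decide) (by decide) (by decide)
        (fun a => by rw [(by decide : pvVal 'T' = 10), (by decide : '1'.toNat = 49),
          (by decide : '0'.toNat = 48)]; omega)
  · refine pvBlock_pair c '0' c (by unfold pvBlock; rw [pvGet_digit_none c h]) (by decide) h
      (fun a => ?_)
    rw [pvVal_digit c h, (by decide : '0'.toNat = 48)]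
    omega

-- one step of B's loop
theorem pvStepB (c : Char)
    (h : c ∈ (['A', 'K', 'Q', 'J', 'T'] : List Char) ∨ c.isDigit = true) (r : ℤ) :
    (match pvLabelToValue.get? c with
     | some v => some (r * 100 + v)
     | none => (PySem.Int.ofChars? [c]).bind (fun v => some (r * 100 + v)))
    = some (r * 100 + (pvVal c : ℤ)) := by
  rcases h with h | h
  · fin_cases h
    · simp [(by decide : pvLabelToValue.get? 'A' = some 14), (by decide : pvVal 'A' = 14)]
    · simp [(by decide : pvLabelToValue.get? 'K' = some 13), (by decide : pvVal 'K' = 13)]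
    · simp [(by decide : pvLabelToValue.get? 'Q' = some 12), (by decide : pvVal 'Q' = 12)]
    · simp [(by decide : pvLabelToValue.get? 'J' = some 11), (by decide : pvVal 'J' = 11)]
    · simp [(by decide : pvLabelToValue.get? 'T' = some 10), (by decide : pvVal 'T' = 10)]
  · rw [pvGet_digit_none c h]
    show (PySem.Int.ofChars? [c]).bind _ = _
    rw [pvOfCharsDigits [c] (by simp) (by simpa using h)]
    simp [List.foldl, pvVal_digit c h]

-- B's loop computes the base-100 fold
theorem pvFoldB (l : List Char)
    (h : ∀ c ∈ l, c ∈ (['A', 'K', 'Q', 'J', 'T'] : List Char) ∨ c.isDigit = true) (r : ℤ) :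
    l.foldl (fun acc char =>
      acc.bind (fun result =>
        match pvLabelToValue.get? char with
        | some v => some (result * 100 + v)
        | none => (PySem.Int.ofChars? [char]).bind (fun v => some (result * 100 + v))))
      (some r)
    = some (l.foldl (fun a c => a * 100 + (pvVal c : ℤ)) r) := by
  induction l generalizing r with
  | nil => rfl
  | cons c t ih =>
    rw [List.foldl_cons, List.foldl_cons]
    show t.foldl _ (match pvLabelToValue.get? c with
      | some v => some (r * 100 + v)
      | none => (PySem.Int.ofChars? [c]).bind (fun v => some (r * 100 + v))) = _
    rw [pvStepB c (h c List.mem_cons_self) r]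
    exact ih (fun x hx => h x (List.mem_cons_of_mem _ hx)) _

-- every character A emits is a digit, and at least one is emitted
theorem pvFlat_digits (l : List Char)
    (h : ∀ c ∈ l, c ∈ (['A', 'K', 'Q', 'J', 'T'] : List Char) ∨ c.isDigit = true) :
    ∀ d ∈ l.flatMap pvBlock, d.isDigit = true := by
  intro d hd
  rw [List.mem_flatMap] at hd
  obtain ⟨c, hc, hdc⟩ := hd
  exact (pvBlock_digits c (h c hc)).1 d hdc

theorem pvFlat_ne_nil (l : List Char) (hne : l ≠ [])
    (h : ∀ c ∈ l, c ∈ (['A', 'K', 'Q', 'J', 'T'] : List Char) ∨ c.isDigit = true) :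
    l.flatMap pvBlock ≠ [] := by
  cases l with
  | nil => exact absurd rfl hne
  | cons c t =>
    rw [List.flatMap_cons]
    intro heq
    exact (pvBlock_digits c (h c List.mem_cons_self)).2.1 (List.append_eq_nil_iff.mp heq).1

-- the base-10 fold over A's digit string is the base-100 fold over the cards
theorem pvFoldFlat (l : List Char)
    (h : ∀ c ∈ l, c ∈ (['A', 'K', 'Q', 'J', 'T'] : List Char) ∨ c.isDigit = true) (acc : ℕ) :
    (l.flatMap pvBlock).foldl (fun a c => a * 10 + (c.toNat - 48)) acc
      = l.foldl (fun a c => a * 100 + pvVal c) acc := by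
  induction l generalizing acc with
  | nil => rfl
  | cons c t ih =>
    rw [List.flatMap_cons, List.foldl_append, (pvBlock_digits c (h c List.mem_cons_self)).2.2 acc,
      List.foldl_cons]
    exact ih (fun x hx => h x (List.mem_cons_of_mem _ hx)) _

theorem pvCast (l : List Char) (acc : ℕ) :
    ((l.foldl (fun a c => a * 100 + pvVal c) acc : ℕ) : ℤ)
      = l.foldl (fun a c => a * 100 + (pvVal c : ℤ)) (acc : ℤ) := by
  induction l generalizing acc with
  | nil => rfl
  | cons c t ih =>
    rw [List.foldl_cons, List.foldl_cons, ih]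
    push_cast
    ring_nf

-- ===== VERDICT (by name: the statement is the Claim_ definition above) =====
theorem CreateValueFromCards_spec : Claim_equal_CreateValueFromCards := by
  intro Card _ hPre
  obtain ⟨hne, hval'⟩ := hPre
  have hval : ∀ c ∈ Card.toList, c ∈ (['A', 'K', 'Q', 'J', 'T'] : List Char) ∨ c.isDigit = true :=
    fun c hc => by simpa using (List.all_eq_true.mp hval') c hc
  unfold Spec_CreateValueFromCards CreateValueFromCards CreateValueFromCards_alt
  rw [pvFoldA Card.toList []]
  show (PySem.Int.ofChars? ([] ++ Card.toList.flatMap pvBlock)).getD 0 = _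
  rw [List.nil_append,
    pvOfCharsDigits _ (pvFlat_ne_nil _ hne hval) (pvFlat_digits _ hval),
    pvFoldFlat _ hval 0, pvFoldB _ hval 0]
  simp only [Option.getD_some]
  simpa using pvCast Card.toList 0

theorem CreateValueFromCards_raises : Claim_raises_CreateValueFromCards := by
  unfold Claim_raises_CreateValueFromCards
  exact ⟨fun Card _ hr hp => hp.1 hr, by decide⟩

-- witness self-check: the value written in pvRaiseWitnessOut_ is B's actual output at the raise witness
theorem pvRaiseWitnessOut_ok :
    CreateValueFromCards_alt pvRaiseWitness_CreateValueFromCards = pvRaiseWitnessOut_CreateValueFromCards :=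
  CreateValueFromCards_raises.2.2.2
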